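-- pv_equiv track=rewrite | github.com/kyza84/baze | launcher_gui.py | compact_runtime_lines
-- ===== SOURCE A (Python) =====
-- NOISE_LOG_SNIPPETS = (
--     "telegram.ext.Updater:",
--     "telegram.ext.Application:",
--     "httpx.RemoteProtocolError",
--     "httpcore.RemoteProtocolError",
--     "Traceback (most recent call last):",
--     "site-packages\\telegram\\",
--     "site-packages\\httpx\\",
--     "site-packages\\httpcore\\",
-- )
--
-- def compact_runtime_lines(lines: list[str]) -> list[str]:
--     out: list[str] = []
--     skipping_trace = False
--     for line in lines:
--         if not line.strip():
--             if skipping_trace: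
--                 skipping_trace = False
--             continue
--         if "Traceback (most recent call last):" in line:
--             skipping_trace = True
--             continue
--         if skipping_trace:
--             # Drop traceback body and site-package stack frames.
--             if line.startswith(" ") or line.startswith("\t") or "File \"" in line:
--                 continue
--             skipping_trace = False
--         if any(noise in line for noise in NOISE_LOG_SNIPPETS):
--             continue
--         out.append(line)
--     return out
-- ===== SOURCE B (Python) =====
-- NOISE_LOG_SNIPPETS = (
--     "telegram.ext.Updater:",
--     "telegram.ext.Application:",
--     "httpx.RemoteProtocolError",
--     "httpcore.RemoteProtocolError",
--     "Traceback (most recent call last):",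
--     "site-packages\\telegram\\",
--     "site-packages\\httpx\\",
--     "site-packages\\httpcore\\",
-- )
--
-- def compact_runtime_lines(lines: list[str]) -> list[str]:
--     out: list[str] = []
--     i = 0
--     n = len(lines)
--     while i < n:
--         line = lines[i]
--         if not line.strip():
--             i += 1
--             continue
--         if "Traceback (most recent call last):" in line:
--             i += 1
--             # skip the traceback body with an inner loop
--             while i < n:
--                 cur = lines[i]
--                 if not cur.strip():
--                     i += 1
--                     break
--                 if cur.startswith(" ") or cur.startswith("\t") or "File \"" in cur:
--                     i += 1
--                     continue
--                 break  # boundary line: reprocess it in the outer loop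
--             continue
--         if any(noise in line for noise in NOISE_LOG_SNIPPETS):
--             i += 1
--             continue
--         out.append(line)
--         i += 1
--     return out
-- ===== Notes on version B (the rewrite author's own statement) =====
-- stated objective: alternative
-- what changed: Replaces the carried skipping_trace boolean flag with an index-based outer while loop plus a nested inner while loop that consumes the traceback body and breaks without advancing at the boundary line, so the outer loop carries no flag state.
import Mathlib
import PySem

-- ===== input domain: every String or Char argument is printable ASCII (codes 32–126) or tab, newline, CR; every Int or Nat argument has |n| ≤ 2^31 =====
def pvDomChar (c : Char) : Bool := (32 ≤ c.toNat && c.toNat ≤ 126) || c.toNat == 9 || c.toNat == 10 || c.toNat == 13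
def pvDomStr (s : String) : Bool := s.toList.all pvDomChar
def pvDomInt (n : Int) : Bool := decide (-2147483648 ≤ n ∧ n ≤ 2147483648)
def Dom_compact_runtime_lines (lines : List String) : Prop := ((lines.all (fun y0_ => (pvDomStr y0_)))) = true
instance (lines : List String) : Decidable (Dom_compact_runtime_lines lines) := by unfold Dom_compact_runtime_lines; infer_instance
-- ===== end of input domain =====

-- B replaces the carried skipping_trace flag with an index-based outer loop plus a nested
-- inner loop for the traceback body (objective: alternative decomposition, same cost).

-- ===== PORT A =====
def pvNOISE : List String :=
  ["telegram.ext.Updater:", "telegram.ext.Application:", "httpx.RemoteProtocolError",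
   "httpcore.RemoteProtocolError", "Traceback (most recent call last):",
   "site-packages\\telegram\\", "site-packages\\httpx\\", "site-packages\\httpcore\\"]

def pvTB : String := "Traceback (most recent call last):"

-- `not line.strip()`
def pvBlank (l : String) : Bool := PySem.Str.strip l == ""
-- `line.startswith(" ") or line.startswith("\t") or 'File "' in line`
def pvIndented (l : String) : Bool :=
  PySem.Str.startswith l " " || PySem.Str.startswith l "\t" || PySem.Str.isIn "File \"" l
-- `any(noise in line for noise in NOISE_LOG_SNIPPETS)`
def pvNoise (l : String) : Bool := pvNOISE.any (fun n => PySem.Str.isIn n l)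

-- one iteration of A's for-loop over the state (out, skipping_trace)
def pvStepA (st : List String × Bool) (line : String) : List String × Bool :=
  if pvBlank line then (st.1, if st.2 then false else st.2)
  else if PySem.Str.isIn pvTB line then (st.1, true)
  else if st.2 && pvIndented line then (st.1, st.2)
  else if pvNoise line then (st.1, false)   -- after `if skipping: … skipping_trace = False`
  else (st.1 ++ [line], false)

def compact_runtime_lines (lines : List String) : List String :=
  (lines.foldl pvStepA ([], false)).1

-- ===== PORT B =====
-- B's inner while loop: consume the traceback body, return the remaining lines
def pvSkipTrace : List String → List String
  | [] => []
  | cur :: rest =>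
      if pvBlank cur then rest
      else if pvIndented cur then pvSkipTrace rest
      else cur :: rest    -- boundary line: left for the outer loop

theorem pvSkipTrace_length_le (ls : List String) : (pvSkipTrace ls).length ≤ ls.length := by
  induction ls with
  | nil => simp [pvSkipTrace]
  | cons c rest ih => unfold pvSkipTrace; split_ifs <;> simp <;> omega

-- B's outer while loop
def pvAltGo (out : List String) : List String → List String
  | [] => out
  | line :: rest =>
      if pvBlank line then pvAltGo out rest
      else if PySem.Str.isIn pvTB line then pvAltGo out (pvSkipTrace rest)
      else if pvNoise line then pvAltGo out rest
      else pvAltGo (out ++ [line]) rest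
  termination_by ls => ls.length
  decreasing_by
    · simp
    · have := pvSkipTrace_length_le rest; simp; omega
    · simp
    · simp

def compact_runtime_lines_alt (lines : List String) : List String := pvAltGo [] lines

-- ===== PRECONDITION & SPEC =====
def Spec_compact_runtime_lines (lines : List String) (out : List String) : Prop := out = compact_runtime_lines_alt lines
instance (lines : List String) (out : List String) : Decidable (Spec_compact_runtime_lines lines out) := by unfold Spec_compact_runtime_lines; infer_instance

-- ===== CLAIM (what is proved, stated in full; the proofs are below) =====
def Claim_equal_compact_runtime_lines : Prop := ∀ (lines : List String), Dom_compact_runtime_lines lines → Spec_compact_runtime_lines lines (compact_runtime_lines lines)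

-- ===== LEMMAS AND PROOFS =====

-- Main invariant: A's fold from state (out, sk) equals B's loop, where sk = true
-- corresponds to B being about to run the inner skip loop.
theorem pvMain (n : Nat) : ∀ (ls : List String), ls.length ≤ n → ∀ (out : List String),
    (ls.foldl pvStepA (out, false)).1 = pvAltGo out ls ∧
    (ls.foldl pvStepA (out, true)).1 = pvAltGo out (pvSkipTrace ls) := by
  induction n with
  | zero =>
      intro ls h out
      have : ls = [] := by cases ls <;> simp_all
      subst this
      simp [pvAltGo, pvSkipTrace]
  | succ n ih =>
      intro ls h out
      cases ls with
      | nil => simp [pvAltGo, pvSkipTrace]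
      | cons l rest =>
        have hr : rest.length ≤ n := by simp at h; omega
        constructor
        · -- A not skipping
          by_cases hb : pvBlank l = true
          · simp [List.foldl_cons, pvStepA, hb, pvAltGo, (ih rest hr out).1]
          · by_cases ht : PySem.Chars.isIn pvTB.toList l.toList = true
            · have h2 := (ih rest hr out).2
              simp [List.foldl_cons, pvStepA, hb, ht, pvAltGo, h2]
            · by_cases hn : pvNoise l = true
              · simp [List.foldl_cons, pvStepA, hb, ht, hn, pvAltGo, (ih rest hr out).1]
              · simp [List.foldl_cons, pvStepA, hb, ht, hn, pvAltGo,
                      (ih rest hr (out ++ [l])).1]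
        · -- A skipping: B is at the head of pvSkipTrace (l :: rest)
          by_cases hb : pvBlank l = true
          · simp [List.foldl_cons, pvStepA, hb, pvSkipTrace, (ih rest hr out).1]
          · by_cases ht : PySem.Chars.isIn pvTB.toList l.toList = true
            · by_cases hi : pvIndented l = true
              · simp [List.foldl_cons, pvStepA, hb, ht, hi, pvSkipTrace,
                      (ih rest hr out).2]
              · simp [List.foldl_cons, pvStepA, hb, ht, hi, pvSkipTrace, pvAltGo,
                      (ih rest hr out).2]
            · by_cases hi : pvIndented l = true
              · simp [List.foldl_cons, pvStepA, hb, ht, hi, pvSkipTrace,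
                      (ih rest hr out).2]
              · by_cases hn : pvNoise l = true
                · simp [List.foldl_cons, pvStepA, hb, ht, hi, hn, pvSkipTrace, pvAltGo,
                        (ih rest hr out).1]
                · simp [List.foldl_cons, pvStepA, hb, ht, hi, hn, pvSkipTrace, pvAltGo,
                        (ih rest hr (out ++ [l])).1]

-- ===== VERDICT (by name: the statement is the Claim_ definition above) =====
theorem compact_runtime_lines_spec : Claim_equal_compact_runtime_lines := by
  intro lines _
  unfold Spec_compact_runtime_lines compact_runtime_lines compact_runtime_lines_alt
  exact (pvMain lines.length lines le_rfl []).1
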